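/- GENERATED by mk_final_copies.py from the proof of the farm's unit `start_decoder.C2b` (farm:start_decoder.C2b.1: Proof.lean) as the
   re-elaboration sweep compiled it — do not edit. -/
import Asan.CheckWalk
import Vorbis.Spec.Units.start_decoder_C2b
import Vorbis.Spec.Worked.start_decoder_C2b_Lemmas
import Vorbis.Spec.StartDecoderCarry
import Vorbis.Spec.StartDecoderC7

open X86 X86.User Asan Vorbis Vorbis.Spec Vorbis.Spec.StartDecoder

set_option maxRecDepth 100000
set_option maxHeartbeats 4000000

namespace Vorbis.Spec.start_decoder_C2b

/-- Segment C2b of `start_decoder` (0x1143aa → 0x1143f8 ∨ 0x1144c2 ∨ ERR), composed from the four pieces of Lemmas.lean: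
`c2b_ord` (`cut90` → the join, stopped at `chk41`: `sparse = ordered ? 0 : get_bits(f, 1)`), `c2b_fix6` (the checked store
`c->sparse`, FIX 6 → ERRSTUB(20), the last check before the allocator call: `ret121` sparse / `ret130` dense), `c2b_sparse`
(`setup_temp_malloc(f, entries)` → `cut91`, `AtC2c`), `c2b_dense` (`setup_malloc(f, entries)` → `cut99`, `AtC2d`). -/
theorem c2b_walk : Vorbis.Spec.start_decoder_C2b.Statement := by
  intro Lay hLay μ hμ u₀ hcode hld4 h_bits hst1 h_tmalloc h_error h_malloc
  intro g i v hat
  obtain ⟨A, A2, A3, h⟩ := hat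
  -- 0x1143aa … 0x1143be: the dispatch on `ordered`
  refine (c2b_ord hLay hμ hcode h_bits h).trans ?_
  intro v1 h1
  -- 0x1143be … 0x1143ea / 0x1144b4 / the FIX 6 stub
  refine (c2b_fix6 hLay hμ hcode hld4 hst1 h_error h1).trans ?_
  intro v2 h2
  rcases h2 with herr | hs | hd
  · exact ReachVia.done (Or.inl herr)
  · -- the sparse book: `setup_temp_malloc`
    exact (c2b_sparse hLay hμ hcode h_tmalloc hs).mono (fun w hw => Or.inr (Or.inl hw))
  · -- the dense book: `setup_malloc`
    exact (c2b_dense hLay hμ hcode h_malloc hd).mono (fun w hw => Or.inr (Or.inr hw))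

end Vorbis.Spec.start_decoder_C2b

theorem Vorbis.Spec.Worked.start_decoder_C2b_ok : Vorbis.Spec.start_decoder_C2b.Statement := Vorbis.Spec.start_decoder_C2b.c2b_walk
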